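-- pv_equiv track=rewrite | github.com/bzvr/YandexLyceymPyGame | test.py | find_kekes
-- ===== SOURCE A (Python) =====
-- def find_kekes(d):
--     maxy = 0
--     miny = len(d)
--     for i in range(len(d[0])):
--         for j in range(len(d)):
--             if d[j][i] != 0:
--                 maxy = max(maxy, j)
--                 miny = min(miny, j)
--
--     return miny, maxy
-- ===== SOURCE B (Python) =====
-- def find_kekes(d):
--     rows = [j for j in range(len(d))
--             if any(d[j][i] != 0 for i in range(len(d[0])))]
--     return (min(rows) if rows else len(d), max(rows) if rows else 0)
-- ===== Notes on version B (the rewrite author's own statement) =====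
-- stated objective: simpler
-- what changed: Replaced A's fused column-by-column running-min/max update loop with a two-stage pass: first filter the qualifying row indices into a list (any() short-circuits per row), then take its min and max (with the empty-list defaults A's initial accumulators encode).
import Mathlib
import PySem

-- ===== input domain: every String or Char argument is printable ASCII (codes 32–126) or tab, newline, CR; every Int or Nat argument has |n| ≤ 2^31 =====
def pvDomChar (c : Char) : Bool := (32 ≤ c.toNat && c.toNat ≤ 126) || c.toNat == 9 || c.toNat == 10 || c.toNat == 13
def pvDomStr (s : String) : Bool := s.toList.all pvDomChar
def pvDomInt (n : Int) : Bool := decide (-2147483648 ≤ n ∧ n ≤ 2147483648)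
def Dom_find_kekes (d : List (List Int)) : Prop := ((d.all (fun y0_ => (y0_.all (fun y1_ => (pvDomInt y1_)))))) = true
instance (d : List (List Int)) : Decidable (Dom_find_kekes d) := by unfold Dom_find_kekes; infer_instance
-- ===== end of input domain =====

-- B replaces A's fused running-min/max cell loop with filter-the-row-indices then min/max (simpler decomposition, same cost).

-- ===== PORT A =====
-- literal port of A: outer loop over columns i, inner loop over rows j, fused (maxy, miny) accumulator;
-- d[j][i] via pyGetD (in range under Pre_, where Python does not raise)
def find_kekes (d : List (List Int)) : Int × Int :=
  let st := (PySem.List.pyRange 0 ((PySem.List.pyGetD d 0 []).length : Int) 1).foldl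
    (fun (st : Int × Int) i =>
      (PySem.List.pyRange 0 (d.length : Int) 1).foldl
        (fun (st : Int × Int) j =>
          if PySem.List.pyGetD (PySem.List.pyGetD d j []) i 0 ≠ 0 then
            (max st.1 j, min st.2 j)
          else st) st) (0, (d.length : Int))
  (st.2, st.1)

-- ===== PORT B =====
-- literal port of Source B: build the list of qualifying row indices, then min/max with defaults
def find_kekes_alt (d : List (List Int)) : Int × Int :=
  let rows := (PySem.List.pyRange 0 (d.length : Int) 1).filter
    (fun j => (PySem.List.pyRange 0 ((PySem.List.pyGetD d 0 []).length : Int) 1).any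
      (fun i => decide (PySem.List.pyGetD (PySem.List.pyGetD d j []) i 0 ≠ 0)))
  ((PySem.List.min? rows (fun x => x)).getD (d.length : Int),
   (PySem.List.max? rows (fun x => x)).getD 0)

-- ===== PRECONDITION & SPEC =====
-- Pre_ excludes exactly the inputs where Python A raises IndexError: empty d (evaluating len(d[0]))
-- and grids with a row shorter than row 0 (indexing d[j][i] for i < len(d[0])).
def Pre_find_kekes (d : List (List Int)) : Prop :=
  d ≠ [] ∧ ∀ r ∈ d, d.headI.length ≤ r.length
instance (d : List (List Int)) : Decidable (Pre_find_kekes d) := by unfold Pre_find_kekes; infer_instance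
def pvWitness_find_kekes : List (List Int) := [[1, 0], [0, 0], [2, 0]]

def Spec_find_kekes (d : List (List Int)) (out : Int × Int) : Prop := out = find_kekes_alt d
instance (d : List (List Int)) (out : Int × Int) : Decidable (Spec_find_kekes d out) := by unfold Spec_find_kekes; infer_instance

-- ===== CLAIM (what is proved, stated in full; the proofs are below) =====
def Claim_equal_find_kekes : Prop := ∀ (d : List (List Int)), Dom_find_kekes d → Pre_find_kekes d → Spec_find_kekes d (find_kekes d)

-- ===== LEMMAS AND PROOFS =====

-- two lists with the same members have the same running max (resp. min) from the same seed
theorem pv_foldl_max_eq {l1 l2 : List Int} (a : Int) (h : ∀ x : Int, x ∈ l1 ↔ x ∈ l2) :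
    l1.foldl max a = l2.foldl max a := by
  apply le_antisymm
  · rcases PySem.List.foldl_max_mem l1 a with h1 | h1
    · rw [h1]; exact (PySem.List.le_foldl_max l2 a).1
    · exact (PySem.List.le_foldl_max l2 a).2 _ ((h _).1 h1)
  · rcases PySem.List.foldl_max_mem l2 a with h1 | h1
    · rw [h1]; exact (PySem.List.le_foldl_max l1 a).1
    · exact (PySem.List.le_foldl_max l1 a).2 _ ((h _).2 h1)

theorem pv_foldl_min_eq {l1 l2 : List Int} (a : Int) (h : ∀ x : Int, x ∈ l1 ↔ x ∈ l2) :
    l1.foldl min a = l2.foldl min a := by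
  apply le_antisymm
  · rcases PySem.List.foldl_min_mem l2 a with h1 | h1
    · rw [h1]; exact (PySem.List.foldl_min_le l1 a).1
    · exact (PySem.List.foldl_min_le l1 a).2 _ ((h _).2 h1)
  · rcases PySem.List.foldl_min_mem l1 a with h1 | h1
    · rw [h1]; exact (PySem.List.foldl_min_le l2 a).1
    · exact (PySem.List.foldl_min_le l2 a).2 _ ((h _).1 h1)

-- ===== VERDICT (by name: the statement is the Claim_ definition above) =====
theorem find_kekes_spec : Claim_equal_find_kekes := by
  intro d _ _
  unfold Spec_find_kekes find_kekes find_kekes_alt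
  -- inner loop: the condition does not depend on the accumulator → fold over the filtered row indices
  have hinner : ∀ i : Int, ∀ st : Int × Int,
      (PySem.List.pyRange 0 (d.length : Int) 1).foldl
        (fun (st : Int × Int) j =>
          if PySem.List.pyGetD (PySem.List.pyGetD d j []) i 0 ≠ 0 then
            (max st.1 j, min st.2 j)
          else st) st
      = ((PySem.List.pyRange 0 (d.length : Int) 1).filter
          (fun j => decide (PySem.List.pyGetD (PySem.List.pyGetD d j []) i 0 ≠ 0))).foldl
          (fun (st : Int × Int) j => (max st.1 j, min st.2 j)) st := by
    intro i st
    exact PySem.List.foldl_ite_eq_foldl_filter _ _ _ _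
  simp only [hinner]
  rw [← List.foldl_flatMap]
  rw [PySem.List.foldl_prod_mk (f := fun a j => max a j) (g := fun a j => min a j)]
  -- the flattened qualifying (column-major) index list and B's filtered row list have the same members
  have hmem : ∀ x : Int,
      x ∈ (PySem.List.pyRange 0 ((PySem.List.pyGetD d 0 []).length : Int) 1).flatMap
            (fun i => (PySem.List.pyRange 0 (d.length : Int) 1).filter
              (fun j => decide (PySem.List.pyGetD (PySem.List.pyGetD d j []) i 0 ≠ 0)))
      ↔ x ∈ (PySem.List.pyRange 0 (d.length : Int) 1).filter
            (fun j => (PySem.List.pyRange 0 ((PySem.List.pyGetD d 0 []).length : Int) 1).any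
              (fun i => decide (PySem.List.pyGetD (PySem.List.pyGetD d j []) i 0 ≠ 0))) := by
    intro x
    simp only [List.mem_flatMap, List.mem_filter, List.any_eq_true, decide_eq_true_eq]
    tauto
  rw [pv_foldl_max_eq 0 hmem, pv_foldl_min_eq ((d.length : Int)) hmem]
  -- reduce B's min/max-with-default to the same running folds
  rcases hrows : (PySem.List.pyRange 0 (d.length : Int) 1).filter
      (fun j => (PySem.List.pyRange 0 ((PySem.List.pyGetD d 0 []).length : Int) 1).any
        (fun i => decide (PySem.List.pyGetD (PySem.List.pyGetD d j []) i 0 ≠ 0))) with _ | ⟨x, t⟩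
  · rfl
  · have hx : x ∈ (PySem.List.pyRange 0 (d.length : Int) 1) := by
      have hmem2 : x ∈ x :: t := List.mem_cons_self
      rw [← hrows] at hmem2
      exact (List.mem_filter.mp hmem2).1
    rw [PySem.List.mem_pyRange_one] at hx
    simp only [PySem.List.min?_id_cons, PySem.List.max?_id_cons, Option.getD_some, List.foldl_cons]
    rw [min_eq_right (le_of_lt hx.2), max_eq_right hx.1]
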